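-- pv_equiv track=rewrite | github.com/AugustoOspal/Algebra | CG50/algebra.py | make_sim
-- ===== SOURCE A (Python) =====
-- def make_sim(matrix):
--     counter = 0
--     for i in range(len(matrix)):
--         for j in range(len(matrix[0])):
--             if matrix[i][j] == 1 and matrix[j][i] == 0:
--                 matrix[j][i] = 1
--                 counter += 1
--     return matrix, counter
-- ===== SOURCE B (Python) =====
-- def make_sim(matrix):
--     # Closed-form rewrite: the scan's decisions depend only on the original
--     # values, so count the asymmetric pairs in the scanned rectangle once and
--     # build the result entry-wise (returns a new matrix; A mutates in place).
--     n = len(matrix)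
--     m0 = len(matrix[0]) if matrix else 0
--     counter = sum(
--         1
--         for i in range(n)
--         for j in range(m0)
--         if matrix[i][j] == 1 and matrix[j][i] == 0
--     )
--     result = [
--         [1 if (j < n and i < m0 and matrix[j][i] == 1 and matrix[i][j] == 0)
--          else matrix[i][j]
--          for j in range(len(matrix[i]))]
--         for i in range(n)
--     ]
--     return result, counter
-- ===== Notes on version B (the rewrite author's own statement) =====
-- stated objective: simpler
-- what changed: B replaces A's in-place mirror-propagating nested mutation loop by a closed form: the scan's decisions depend only on the original values, so B counts the asymmetric ordered pairs of the scanned rectangle with one comprehension and builds the result matrix entry-wise without mutation (return value only: A mutates its argument, B does not).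
import Mathlib
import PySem

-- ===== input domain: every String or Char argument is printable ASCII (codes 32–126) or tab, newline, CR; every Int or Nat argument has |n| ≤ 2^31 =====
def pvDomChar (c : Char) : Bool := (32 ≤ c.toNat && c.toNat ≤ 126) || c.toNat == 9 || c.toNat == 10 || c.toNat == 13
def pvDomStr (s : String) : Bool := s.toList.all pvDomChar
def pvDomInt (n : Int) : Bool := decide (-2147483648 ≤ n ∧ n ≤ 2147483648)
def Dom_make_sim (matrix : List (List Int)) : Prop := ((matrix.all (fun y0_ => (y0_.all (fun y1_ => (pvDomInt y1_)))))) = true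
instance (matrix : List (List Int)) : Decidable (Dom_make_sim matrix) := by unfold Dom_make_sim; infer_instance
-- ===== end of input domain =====

-- B computes the symmetrization by a closed-form entry-wise rewrite (count the
-- asymmetric pairs once, then build a fresh matrix) instead of A's in-place
-- mirror-propagating scan; return value only: A mutates its argument, B does not.

-- ===== PORT A =====
-- literal transliteration of A: nested loops over range(len(matrix)) ×
-- range(len(matrix[0])) carrying the (matrix, counter) state; the in-range
-- reads matrix[i][j] become getD (exact inside Pre_, where every reached index is in range)
def make_sim (matrix : List (List Int)) : List (List Int) × Int :=
  (List.range matrix.length).foldl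
    (fun st i =>
      (List.range ((st.1.getD 0 []).length)).foldl
        (fun st j =>
          if ((st.1.getD i []).getD j 0 == 1) && ((st.1.getD j []).getD i 0 == 0) then
            (st.1.modify j (fun row => row.set i 1), st.2 + 1)
          else st)
        st)
    (matrix, 0)

-- ===== PORT B =====
-- B-side helpers: the matrix read matrix[p][q] (in range inside Pre_) and the
-- asymmetry test matrix[a][b] == 1 and matrix[b][a] == 0 that Source B uses twice
def gM (M : List (List Int)) (p q : Nat) : Int := (M.getD p []).getD q 0
def condB (M : List (List Int)) (a b : Nat) : Bool := (gM M a b == 1) && (gM M b a == 0)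

def make_sim_alt (matrix : List (List Int)) : List (List Int) × Int :=
  let n := matrix.length
  let m0 := if matrix.isEmpty then 0 else (matrix.getD 0 []).length
  let counter : Int :=
    (((List.range n).map
        (fun i => ((List.range m0).filter (fun j => condB matrix i j)).length)).sum : Nat)
  let result :=
    (List.range n).map (fun i =>
      (List.range ((matrix.getD i []).length)).map (fun j =>
        if decide (j < n) && decide (i < m0) && condB matrix j i then (1 : Int)
        else gM matrix i j))
  (result, counter)

-- ===== PRECONDITION & SPEC =====
-- Pre_ is exactly the inputs on which A returns (no IndexError): every row is
-- at least as long as row 0 (so every scanned cell matrix[i][j] exists), and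
-- every scanned cell holding a 1 has an existing mirror cell matrix[j][i]
def Pre_make_sim (matrix : List (List Int)) : Prop :=
  (∀ i < matrix.length, (matrix.getD 0 []).length ≤ (matrix.getD i []).length) ∧
  (∀ i < matrix.length, ∀ j < (matrix.getD 0 []).length,
    (matrix.getD i []).getD j 0 = 1 →
      j < matrix.length ∧ i < (matrix.getD j []).length)
instance (matrix : List (List Int)) : Decidable (Pre_make_sim matrix) := by
  unfold Pre_make_sim; infer_instance

def pvWitness_make_sim : List (List Int) := [[0, 1], [0, 0]]

def Spec_make_sim (matrix : List (List Int)) (out : List (List Int) × Int) : Prop := out = make_sim_alt matrix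
instance (matrix : List (List Int)) (out : List (List Int) × Int) : Decidable (Spec_make_sim matrix out) := by unfold Spec_make_sim; infer_instance

-- ===== CLAIM (what is proved, stated in full; the proofs are below) =====
def Claim_equal_make_sim : Prop := ∀ (matrix : List (List Int)), Dom_make_sim matrix → Pre_make_sim matrix → Spec_make_sim matrix (make_sim matrix)

-- ===== LEMMAS AND PROOFS =====

-- A's inner-loop body, named for the proofs (definitionally the lambda in make_sim)
def stepA (st : List (List Int) × Int) (i j : Nat) : List (List Int) × Int :=
  if ((st.1.getD i []).getD j 0 == 1) && ((st.1.getD j []).getD i 0 == 0) then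
    (st.1.modify j (fun row => row.set i 1), st.2 + 1)
  else st

-- cell (p,q) of A's working matrix has been overwritten to 1 once the scan has
-- passed position (i,j) in lexicographic order: its mirror (q,p) lies in the
-- scanned rectangle, was read at the earlier step (q,p), and satisfied
-- matrix[q][p] == 1 and matrix[p][q] == 0 (in the ORIGINAL values: a set never
-- changes a decision, since it writes a 1 whose mirror is a 1 already)
abbrev mutP (M : List (List Int)) (i j p q : Nat) : Prop :=
  condB M q p = true ∧ p < (M.getD 0 []).length ∧ (q < i ∨ (q = i ∧ p < j))

-- A's counter once the scan has passed position (i,j)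
def cntA (M : List (List Int)) (i j : Nat) : Nat :=
  ((List.range i).map
      (fun i' => ((List.range (M.getD 0 []).length).filter (fun j' => condB M i' j')).length)).sum
  + ((List.range j).filter (fun j' => condB M i j')).length

lemma gM_modify_set (m : List (List Int)) (i j : Nat)
    (hj : j < m.length) (hi : i < (m.getD j []).length) (p q : Nat) :
    gM (m.modify j (fun row => row.set i 1)) p q
      = if p = j ∧ q = i then 1 else gM m p q := by
  unfold gM
  simp only [List.getD_eq_getElem?_getD, List.getElem?_modify]
  by_cases hpj : p = j
  · subst hpj
    rw [List.getElem?_eq_getElem hj]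
    simp only [if_true, true_and, Option.map_eq_map, Option.map_some, Option.getD_some]
    rw [List.getElem?_set]
    rw [List.getD_eq_getElem?_getD, List.getElem?_eq_getElem hj, Option.getD_some] at hi
    by_cases hqi : q = i
    · subst hqi
      simp [hi]
    · simp [hqi, Ne.symm hqi]
  · simp [Ne.symm hpj, hpj]

lemma rows_modify_set (m : List (List Int)) (i j : Nat) (p : Nat) :
    ((m.modify j (fun row => row.set i 1)).getD p []).length = (m.getD p []).length := by
  simp only [List.getD_eq_getElem?_getD, List.getElem?_modify]
  by_cases hpj : p = j
  · subst hpj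
    cases h : m[p]? with
    | none => simp
    | some row => simp
  · cases h : m[p]? with
    | none => simp
    | some row => simp [Ne.symm hpj]

lemma mut_succ (M : List (List Int)) (i j p q : Nat) (hne : ¬(p = j ∧ q = i)) :
    mutP M i j p q ↔ mutP M i (j + 1) p q := by
  unfold mutP
  constructor <;> rintro ⟨h1, h2, h3⟩ <;> exact ⟨h1, h2, by omega⟩

lemma mut_row_end (M : List (List Int)) (i p q : Nat) :
    mutP M i (M.getD 0 []).length p q ↔ mutP M (i + 1) 0 p q := by
  unfold mutP
  constructor <;> rintro ⟨h1, h2, h3⟩ <;> exact ⟨h1, h2, by omega⟩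

lemma cnt_succ (M : List (List Int)) (i j : Nat) :
    cntA M i (j + 1) = cntA M i j + (if condB M i j then 1 else 0) := by
  unfold cntA
  rw [List.range_succ, List.filter_append]
  by_cases hc : condB M i j
  · simp [hc]; omega
  · simp [hc]

lemma cnt_row_end (M : List (List Int)) (i : Nat) :
    cntA M i (M.getD 0 []).length = cntA M (i + 1) 0 := by
  simp [cntA, List.range_succ]

lemma inner_loop (M : List (List Int))
    (hsq2 : ∀ i < M.length, ∀ j < (M.getD 0 []).length,
      gM M i j = 1 → j < M.length ∧ i < (M.getD j []).length)
    (i : Nat) (hi : i < M.length) :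
    ∀ (k j : Nat), j + k = (M.getD 0 []).length →
    ∀ (m : List (List Int)) (c : Int),
      m.length = M.length →
      (∀ p, (m.getD p []).length = (M.getD p []).length) →
      (∀ p q, gM m p q = if mutP M i j p q then 1 else gM M p q) →
      c = (cntA M i j : Int) →
      ∃ m', (List.range' j k).foldl (fun st j' => stepA st i j') (m, c)
              = (m', (cntA M i (M.getD 0 []).length : Int)) ∧
        m'.length = M.length ∧ (∀ p, (m'.getD p []).length = (M.getD p []).length) ∧
        (∀ p q, gM m' p q = if mutP M i (M.getD 0 []).length p q then 1 else gM M p q) := by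
  intro k
  induction k with
  | zero =>
    intro j hjk m c hml hrows hpt hc
    have : j = (M.getD 0 []).length := by omega
    subst this
    exact ⟨m, by simp [hc], hml, hrows, hpt⟩
  | succ k ih =>
    intro j hjk m c hml hrows hpt hc
    have hj : j < (M.getD 0 []).length := by omega
    rw [List.range'_succ, List.foldl_cons]
    -- the guard A reads from the working matrix equals condB M i j
    have hmut_ji : ¬ mutP M i j j i := by
      rintro ⟨-, -, h⟩; omega
    have hguard : (((m.getD i []).getD j 0 == 1) && ((m.getD j []).getD i 0 == 0))
        = condB M i j := by
      show ((gM m i j == 1) && (gM m j i == 0)) = condB M i j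
      rw [hpt i j, hpt j i, if_neg hmut_ji]
      by_cases h2 : mutP M i j i j
      · have hji : gM M j i = 1 ∧ gM M i j = 0 := by
          have := h2.1; simp [condB] at this; exact this
        rw [if_pos h2]
        simp [condB, hji.1, hji.2]
      · rw [if_neg h2]; rfl
    by_cases hcij : condB M i j
    · -- asymmetric cell found: A sets the mirror and counts it
      have hstep : stepA (m, c) i j
          = (m.modify j (fun row => row.set i 1), c + 1) := by
        simp only [stepA]
        rw [hguard, if_pos hcij]
      rw [hstep]
      have horig : gM M i j = 1 ∧ gM M j i = 0 := by
        have := hcij; simp [condB] at this; exact this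
      obtain ⟨hjn, hilen⟩ := hsq2 i hi j hj horig.1
      have hjm : j < m.length := by rw [hml]; exact hjn
      have him : i < (m.getD j []).length := by rw [hrows j]; exact hilen
      refine ih (j + 1) (by omega) _ _ (by simpa using hml)
        (fun p => by rw [rows_modify_set, hrows]) ?_ ?_
      · intro p q
        rw [gM_modify_set m i j hjm him p q]
        by_cases hpq : p = j ∧ q = i
        · obtain ⟨hp, hq⟩ := hpq
          rw [if_pos ⟨hp, hq⟩,
            if_pos ⟨by rw [hq, hp]; exact hcij, by omega, Or.inr ⟨hq, by omega⟩⟩]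
        · rw [if_neg hpq, hpt, if_congr (mut_succ M i j p q hpq) rfl rfl]
      · rw [hc, cnt_succ, if_pos hcij]; push_cast; ring
    · -- symmetric or irrelevant cell: A does nothing
      have hstep : stepA (m, c) i j = (m, c) := by
        simp only [stepA]
        rw [hguard, if_neg hcij]
      rw [hstep]
      refine ih (j + 1) (by omega) _ _ hml hrows ?_ ?_
      · intro p q
        by_cases hpq : p = j ∧ q = i
        · obtain ⟨hp, hq⟩ := hpq
          have h1 : ¬ mutP M i j p q := by rintro ⟨-, -, h⟩; omega
          have h2 : ¬ mutP M i (j + 1) p q := by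
            rintro ⟨hcb, -, -⟩; rw [hq, hp] at hcb; exact hcij hcb
          rw [hpt, if_neg h1, if_neg h2]
        · rw [hpt, if_congr (mut_succ M i j p q hpq) rfl rfl]
      · rw [hc, cnt_succ, if_neg hcij]; push_cast; ring

lemma outer_loop (M : List (List Int))
    (hsq2 : ∀ i < M.length, ∀ j < (M.getD 0 []).length,
      gM M i j = 1 → j < M.length ∧ i < (M.getD j []).length) :
    ∀ (k i : Nat), i + k = M.length →
    ∀ (m : List (List Int)) (c : Int),
      m.length = M.length →
      (∀ p, (m.getD p []).length = (M.getD p []).length) →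
      (∀ p q, gM m p q = if mutP M i 0 p q then 1 else gM M p q) →
      c = (cntA M i 0 : Int) →
      ∃ m', (List.range' i k).foldl
              (fun st i' =>
                (List.range ((st.1.getD 0 []).length)).foldl
                  (fun st j => stepA st i' j) st) (m, c)
              = (m', (cntA M M.length 0 : Int)) ∧
        m'.length = M.length ∧ (∀ p, (m'.getD p []).length = (M.getD p []).length) ∧
        (∀ p q, gM m' p q = if mutP M M.length 0 p q then 1 else gM M p q) := by
  intro k
  induction k with
  | zero =>
    intro i hik m c hml hrows hpt hc
    have : i = M.length := by omega
    subst this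
    exact ⟨m, by simp [hc], hml, hrows, hpt⟩
  | succ k ih =>
    intro i hik m c hml hrows hpt hc
    have hi : i < M.length := by omega
    rw [List.range'_succ, List.foldl_cons]
    rw [hrows 0, List.range_eq_range']
    obtain ⟨m', heq, hml', hrows', hpt'⟩ :=
      inner_loop M hsq2 i hi (M.getD 0 []).length 0 (by omega) m c hml hrows hpt hc
    rw [heq]
    refine ih (i + 1) (by omega) m' _ hml' hrows' ?_ (by rw [cnt_row_end])
    intro p q
    rw [hpt', if_congr (mut_row_end M i p q) rfl rfl]

-- ===== VERDICT (by name: the statement is the Claim_ definition above) =====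
theorem make_sim_spec : Claim_equal_make_sim := by
  intro M _ hpre
  show make_sim M = make_sim_alt M
  obtain ⟨hsq1, hsq2⟩ := hpre
  have e1 : make_sim M = (List.range' 0 M.length).foldl
      (fun st i' =>
        (List.range ((st.1.getD 0 []).length)).foldl
          (fun st j => stepA st i' j) st) (M, 0) := by
    unfold make_sim stepA
    rw [List.range_eq_range']
  have hpt0 : ∀ p q, gM M p q = if mutP M 0 0 p q then 1 else gM M p q := by
    intro p q
    rw [if_neg]
    rintro ⟨-, -, h⟩; omega
  obtain ⟨m', heq, hml', hrows', hpt'⟩ :=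
    outer_loop M hsq2 M.length 0 (by omega) M 0 rfl (fun p => rfl) hpt0 (by simp [cntA])
  rw [e1, heq]
  unfold make_sim_alt
  have hm0 : (if M.isEmpty then 0 else (M.getD 0 []).length) = (M.getD 0 []).length := by
    cases M <;> simp
  rw [hm0]
  refine Prod.ext ?_ ?_
  · -- the final matrix is B's entry-wise rewrite
    show m' = (List.range M.length).map (fun i =>
      (List.range ((M.getD i []).length)).map (fun j =>
        if decide (j < M.length) && decide (i < (M.getD 0 []).length) && condB M j i
        then (1 : Int) else gM M i j))
    refine List.ext_getElem (by simp [hml']) ?_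
    intro p hp1 hp2
    rw [List.getElem_map, List.getElem_range]
    have hpn : p < M.length := by rw [← hml']; exact hp1
    have hrowp : m'[p].length = (M.getD p []).length := by
      have := hrows' p
      rwa [List.getD_eq_getElem _ _ hp1] at this
    refine List.ext_getElem (by simp [hrowp]) ?_
    intro q hq1 hq2
    rw [List.getElem_map, List.getElem_range]
    have hgm : gM m' p q = m'[p][q] := by
      rw [gM, List.getD_eq_getElem _ _ hp1, List.getD_eq_getElem _ _ hq1]
    rw [← hgm, hpt' p q]
    have hmut : mutP M M.length 0 p q
        ↔ (decide (q < M.length) && decide (p < (M.getD 0 []).length) && condB M q p)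
            = true := by
      simp only [Bool.and_eq_true, decide_eq_true_eq]
      unfold mutP
      constructor
      · rintro ⟨h1, h2, h3⟩; exact ⟨⟨by omega, h2⟩, h1⟩
      · rintro ⟨⟨h1, h2⟩, h3⟩; exact ⟨h3, h2, Or.inl h1⟩
    rw [if_congr hmut rfl rfl]
  · show (cntA M M.length 0 : Int) = _
    simp [cntA]
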